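-- pv_equiv track=rewrite | github.com/gribskov/biocomputing | utils/mpileup.py | count
-- ===== SOURCE A (Python) =====
-- def count(seq):
--     """---------------------------------------------------------------------------------------------
--     Count the bases in the sequence. convert lowercase, which means pposite strand to uppercase
--     ignore special mpileup charcters such as $, ^, etc.
--
--     :param seq:
--     :return: dict, key=base, value=count
--     ---------------------------------------------------------------------------------------------"""
--
--     count = {}
--     for base in seq:
--         if base not in 'AaCcGgTt':
--             continue
--
--         try:
--             count[base.upper()] += 1
--         except KeyError:
--             count[base.upper()] = 1
--
--     return count
-- ===== SOURCE B (Python) =====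
-- def count(seq):
--     """Same result as A: counts of A/C/G/T (case-insensitive), keyed by uppercase base,
--     in order of first occurrence. Different strategy: uppercase the whole sequence once,
--     dedupe it in first-occurrence order, and build the dict by one str.count per distinct
--     valid base instead of A's per-character try/except increment loop."""
--     s = seq.upper()
--     return {b: s.count(b) for b in dict.fromkeys(s) if b in 'ACGT'}
-- ===== Notes on version B (the rewrite author's own statement) =====
-- stated objective: idiomatic
-- what changed: A increments a dict entry per character with try/except in one Python-level pass; B uppercases the sequence once, dedupes it in first-occurrence order, and builds the dict in a comprehension with one C-level str.count per distinct valid base.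
import Mathlib
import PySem

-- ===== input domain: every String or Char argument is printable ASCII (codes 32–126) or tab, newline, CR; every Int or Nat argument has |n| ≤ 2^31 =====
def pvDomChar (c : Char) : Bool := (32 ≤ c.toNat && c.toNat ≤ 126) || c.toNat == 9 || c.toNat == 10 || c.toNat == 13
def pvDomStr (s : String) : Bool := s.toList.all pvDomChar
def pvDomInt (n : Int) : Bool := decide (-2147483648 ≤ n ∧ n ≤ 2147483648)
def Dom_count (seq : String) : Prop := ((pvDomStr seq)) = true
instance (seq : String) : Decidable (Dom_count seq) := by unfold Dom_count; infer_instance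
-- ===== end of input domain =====

-- B replaces A's per-character try/except dict-increment pass by: uppercase once, dedupe in
-- first-occurrence order, one count per distinct valid base (idiomatic; same result, same order).


-- ===== PORT A =====
-- the body of A's for-loop: skip non-bases, then try count[base.upper()] += 1 / except KeyError: = 1
def countStep (d : PySem.Dict String Int) (base : Char) : PySem.Dict String Int :=
  if !(PySem.Str.isIn (String.ofList [base]) "AaCcGgTt") then d
  else
    match d.get? (PySem.Str.upper (String.ofList [base])) with
    | some v => d.insert (PySem.Str.upper (String.ofList [base])) (v + 1)
    | none   => d.insert (PySem.Str.upper (String.ofList [base])) 1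

def count (seq : String) : List (String × Int) :=
  (seq.toList.foldl countStep PySem.Dict.empty).items

-- ===== PORT B =====
def count_alt (seq : String) : List (String × Int) :=
  let s := (PySem.Str.upper seq).toList
  ((PySem.List.dedup s).filter (fun b => PySem.Str.isIn (String.ofList [b]) "ACGT")).map
    (fun b => (String.ofList [b], (PySem.List.count s b : Int)))

-- ===== PRECONDITION & SPEC =====
def Spec_count (seq : String) (out : List (String × Int)) : Prop := out = count_alt seq
instance (seq : String) (out : List (String × Int)) : Decidable (Spec_count seq out) := by unfold Spec_count; infer_instance

-- ===== CLAIM (what is proved, stated in full; the proofs are below) =====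
def Claim_equal_count : Prop := ∀ (seq : String), Dom_count seq → Spec_count seq (count seq)

-- ===== LEMMAS AND PROOFS =====

theorem char_eq_of_toNat (c d : Char) (h : c.toNat = d.toNat) : c = d :=
  Char.ext (UInt32.toNat_inj.mp h)

theorem ofList_singleton_inj {b u : Char} (h : String.ofList [b] = String.ofList [u]) : b = u := by
  have := congrArg String.toList h
  simpa using this

theorem isIn_singleton (b : Char) (t : String) :
    PySem.Str.isIn (String.ofList [b]) t = true ↔ b ∈ t.toList := by
  rw [PySem.Str.isIn_iff_infix]
  have hb : (String.ofList [b]).toList = [b] := by simp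
  rw [hb, List.singleton_infix_iff]

theorem upmem_forward (c : Char) (h : (PySem.Chars.upperChar c) ∈ ['A','C','G','T']) :
    c ∈ ['A','a','C','c','G','g','T','t'] := by
  unfold PySem.Chars.upperChar PySem.Chars.islower at h
  split at h
  · rename_i hl
    simp only [Bool.and_eq_true, decide_eq_true_eq] at hl
    have hlo : 97 ≤ c.toNat := Nat.succ_le_of_lt hl.1
    have hhi : c.toNat ≤ 122 := Nat.le_of_lt_succ (Nat.lt_succ_of_le hl.2)
    have hv : (Char.ofNat (c.toNat - 32)).toNat = c.toNat - 32 := by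
      rw [Char.toNat_ofNat, if_pos]
      unfold Nat.isValidChar; left; omega
    simp only [List.mem_cons, List.not_mem_nil, or_false] at h ⊢
    rcases h with h|h|h|h
    · have t := congrArg Char.toNat h; rw [hv] at t
      have hc : c.toNat = ('a' : Char).toNat := by
        have e1 : ('A' : Char).toNat = 65 := rfl
        have e2 : ('a' : Char).toNat = 97 := rfl
        omega
      exact Or.inr (Or.inl (char_eq_of_toNat _ _ hc))
    · have t := congrArg Char.toNat h; rw [hv] at t
      have hc : c.toNat = ('c' : Char).toNat := by
        have e1 : ('C' : Char).toNat = 67 := rfl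
        have e2 : ('c' : Char).toNat = 99 := rfl
        omega
      exact Or.inr (Or.inr (Or.inr (Or.inl (char_eq_of_toNat _ _ hc))))
    · have t := congrArg Char.toNat h; rw [hv] at t
      have hc : c.toNat = ('g' : Char).toNat := by
        have e1 : ('G' : Char).toNat = 71 := rfl
        have e2 : ('g' : Char).toNat = 103 := rfl
        omega
      exact Or.inr (Or.inr (Or.inr (Or.inr (Or.inr (Or.inl (char_eq_of_toNat _ _ hc))))))
    · have t := congrArg Char.toNat h; rw [hv] at t
      have hc : c.toNat = ('t' : Char).toNat := by
        have e1 : ('T' : Char).toNat = 84 := rfl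
        have e2 : ('t' : Char).toNat = 116 := rfl
        omega
      exact Or.inr (Or.inr (Or.inr (Or.inr (Or.inr (Or.inr (Or.inr (char_eq_of_toNat _ _ hc)))))))
  · simp only [List.mem_cons, List.not_mem_nil, or_false] at h ⊢
    rcases h with h|h|h|h <;> simp [h]

-- c is one of AaCcGgTt iff its uppercase is one of ACGT
theorem base_iff (c : Char) :
    PySem.Str.isIn (String.ofList [c]) "AaCcGgTt" = true ↔
      PySem.Chars.upperChar c ∈ ['A','C','G','T'] := by
  rw [isIn_singleton]
  constructor
  · intro h
    have h8 : c ∈ ['A','a','C','c','G','g','T','t'] := by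
      have : "AaCcGgTt".toList = ['A','a','C','c','G','g','T','t'] := by decide
      rwa [this] at h
    fin_cases h8 <;> decide
  · intro h
    have h8 := upmem_forward c h
    have : "AaCcGgTt".toList = ['A','a','C','c','G','g','T','t'] := by decide
    rwa [this]

theorem key_eq (c : Char) :
    PySem.Str.upper (String.ofList [c]) = String.ofList [PySem.Chars.upperChar c] := by
  simp [PySem.Str.upper, PySem.Chars.upper]

-- B's result, as a function of the uppercased character list
def bItems (m : List Char) : List (String × Int) :=
  ((PySem.Set.ofList m).filter (fun b => PySem.Str.isIn (String.ofList [b]) "ACGT")).map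
    (fun b => (String.ofList [b], (List.count b m : Int)))

theorem count_alt_eq (seq : String) :
    count_alt seq = bItems (seq.toList.map PySem.Chars.upperChar) := by
  unfold count_alt bItems PySem.List.dedup PySem.List.count
  simp [PySem.Chars.upper]

theorem keys_bItems (m : List Char) : (PySem.Dict.mk (bItems m)).keys =
    ((PySem.Set.ofList m).filter (fun b => PySem.Str.isIn (String.ofList [b]) "ACGT")).map
      (fun b => String.ofList [b]) := by
  unfold bItems PySem.Dict.keys
  simp

theorem nodup_keys_bItems (m : List Char) : (PySem.Dict.mk (bItems m)).keys.Nodup := by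
  rw [keys_bItems]
  exact ((PySem.Set.nodup_ofList m).filter _).map (fun _ _ h => ofList_singleton_inj h)

-- the loop invariant: A's dict after any prefix IS B's association list for that prefix
theorem main_inv (l : List Char) :
    l.foldl countStep PySem.Dict.empty
      = PySem.Dict.mk (bItems (l.map PySem.Chars.upperChar)) := by
  induction l using List.reverseRecOn with
  | nil => rfl
  | append_singleton l c ih =>
    rw [List.foldl_append, ih, List.map_append, List.map_cons, List.map_nil]
    set u := PySem.Chars.upperChar c with hu
    set mu := l.map PySem.Chars.upperChar with hmu
    simp only [List.foldl_cons, List.foldl_nil]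
    unfold countStep
    by_cases hb : PySem.Str.isIn (String.ofList [c]) "AaCcGgTt" = true
    · -- c is a base; key is ofList [u], u ∈ ACGT
      have hu4 : u ∈ ['A','C','G','T'] := (base_iff c).mp hb
      have hpred : PySem.Str.isIn (String.ofList [u]) "ACGT" = true := by
        rw [isIn_singleton]
        have : "ACGT".toList = ['A','C','G','T'] := by decide
        rw [this]; exact hu4
      rw [hb, key_eq, hu]
      simp only [Bool.not_true, Bool.false_eq_true, if_false]
      by_cases hm : u ∈ mu
      · -- u already counted: the entry is overwritten in place
        have hufil : u ∈ (PySem.Set.ofList mu).filter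
            (fun b => PySem.Str.isIn (String.ofList [b]) "ACGT") :=
          List.mem_filter.mpr ⟨(PySem.Set.mem_ofList _ _).mpr hm, hpred⟩
        have hmemitems : (String.ofList [u], (List.count u mu : Int))
            ∈ (PySem.Dict.mk (bItems mu)).items := by
          show _ ∈ bItems mu
          unfold bItems
          exact List.mem_map.mpr ⟨u, hufil, rfl⟩
        have hget : (PySem.Dict.mk (bItems mu)).get? (String.ofList [u])
            = some ((List.count u mu : Int)) :=
          PySem.Dict.get?_of_mem_items _ hmemitems (nodup_keys_bItems mu)
        rw [hget]
        have hcont : (PySem.Dict.mk (bItems mu)).contains (String.ofList [u]) = true := by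
          rw [PySem.Dict.contains_eq_isSome_get?, hget]; rfl
        apply PySem.Dict.ext
        rw [PySem.Dict.items_insert_of_contains _ _ hcont]
        show (bItems mu).map _ = bItems (mu ++ [u])
        unfold bItems
        rw [PySem.Set.ofList_append_singleton,
            PySem.Set.add_of_mem ((PySem.Set.mem_ofList _ _).mpr hm), List.map_map]
        apply List.map_congr_left
        intro b hbf
        have hbmu : b ∈ mu := (PySem.Set.mem_ofList _ _).mp (List.mem_filter.mp hbf).1
        by_cases hbe : b = u
        · subst hbe
          simp [List.count_append]
        · have hne : ¬ (String.ofList [b] = String.ofList [u]) :=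
            fun h => hbe (ofList_singleton_inj h)
          simp [hne, List.count_append, Ne.symm hbe]
      · -- first occurrence of u: a fresh key is appended with count 1
        have hnk : String.ofList [u] ∉ (PySem.Dict.mk (bItems mu)).keys := by
          rw [keys_bItems]
          intro h
          obtain ⟨b, hbf, hbe⟩ := List.mem_map.mp h
          have hbmu : b ∈ mu := (PySem.Set.mem_ofList _ _).mp (List.mem_filter.mp hbf).1
          exact hm (ofList_singleton_inj hbe ▸ hbmu)
        have hget : (PySem.Dict.mk (bItems mu)).get? (String.ofList [u]) = none :=
          (PySem.Dict.get?_eq_none_iff_not_mem_keys _ _).mpr hnk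
        rw [hget]
        have hcont : (PySem.Dict.mk (bItems mu)).contains (String.ofList [u]) = false := by
          rw [PySem.Dict.contains_eq_isSome_get?, hget]; rfl
        apply PySem.Dict.ext
        rw [PySem.Dict.items_insert_of_not_contains _ _ hcont]
        show bItems mu ++ [(String.ofList [u], 1)] = bItems (mu ++ [u])
        unfold bItems
        rw [PySem.Set.ofList_append_singleton,
            PySem.Set.add_of_not_mem (fun h => hm ((PySem.Set.mem_ofList _ _).mp h)),
            List.filter_append, List.map_append]
        congr 1
        · apply List.map_congr_left
          intro b hbf
          have hbmu : b ∈ mu := (PySem.Set.mem_ofList _ _).mp (List.mem_filter.mp hbf).1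
          have hbe : b ≠ u := fun h => hm (h ▸ hbmu)
          simp [List.count_append, Ne.symm hbe]
        · simp only [List.filter_cons, hpred, List.filter_nil, if_true, List.map_cons, List.map_nil]
          have hc0 : List.count u mu = 0 := List.count_eq_zero.mpr hm
          simp [List.count_append, hc0]
    · -- not a base: A skips it, and u ∉ ACGT so B's filter drops it too
      rw [Bool.eq_false_iff.mpr hb]
      simp only [Bool.not_false, if_true]
      have hu4 : u ∉ ['A','C','G','T'] := fun h => hb ((base_iff c).mpr h)
      have hpred : PySem.Str.isIn (String.ofList [u]) "ACGT" = false := by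
        rw [Bool.eq_false_iff]
        intro h
        apply hu4
        have : "ACGT".toList = ['A','C','G','T'] := by decide
        rw [← this]; exact (isIn_singleton u "ACGT").mp h
      apply PySem.Dict.ext
      show bItems mu = bItems (mu ++ [u])
      unfold bItems
      rw [PySem.Set.ofList_append_singleton, PySem.Set.add_eq_ite]
      by_cases hm : u ∈ PySem.Set.ofList mu
      · rw [if_pos hm]
        apply List.map_congr_left
        intro b hbf
        have hbp := (List.mem_filter.mp hbf).2
        have hbe : b ≠ u := fun h => by rw [h, hpred] at hbp; exact Bool.false_ne_true hbp
        simp [List.count_append, Ne.symm hbe]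
      · rw [if_neg hm, List.filter_append]
        simp only [List.filter_cons, hpred, List.filter_nil, List.append_nil,
          Bool.false_eq_true, if_false]
        apply List.map_congr_left
        intro b hbf
        have hbp := (List.mem_filter.mp hbf).2
        have hbe : b ≠ u := fun h => by rw [h, hpred] at hbp; exact Bool.false_ne_true hbp
        simp [List.count_append, Ne.symm hbe]

-- ===== VERDICT (by name: the statement is the Claim_ definition above) =====
theorem count_spec : Claim_equal_count := by
  intro seq _
  show count seq = count_alt seq
  rw [count_alt_eq]
  unfold count
  rw [main_inv]
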